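-- pv_equiv track=rewrite | github.com/SymphonyIceAttack/pytoexe-use | python-files/1771735002088-zrld-min36.py | find_group_by_minute
-- ===== SOURCE A (Python) =====
-- trade_table = [
--     ["01:00:00","01:00:30 prepare trade","01:01:00 go trade"],
--     ["01:01:30","01:02:00 prepare trade","01:02:30 go trade"],
--     ["01:03:00","01:03:30 prepare trade","01:04:00 go trade"],
--     ["01:04:30","01:05:00 prepare trade","01:05:30 go trade"],
--     ["01:06:00","01:06:30 prepare trade","01:07:00 go trade"],
--     ["01:07:30","01:08:00 prepare trade","01:08:30 go trade"],
--     ["01:09:00","01:09:30 prepare trade","01:10:00 go trade"],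
--     ["01:10:30","01:11:00 prepare trade","01:11:30 go trade"],
--     ["01:12:00","01:12:30 prepare trade","01:13:00 go trade"],
--     ["01:13:30","01:14:00 prepare trade","01:14:30 go trade"],
--     ["01:15:00","01:15:30 prepare trade","01:16:00 go trade"],
--     ["01:16:30","01:17:00 prepare trade","01:17:30 go trade"],
--     ["01:18:00","01:18:30 prepare trade","01:19:00 go trade"],
--     ["01:19:30","01:20:00 prepare trade","01:20:30 go trade"],
--     ["01:21:00","01:21:30 prepare trade","01:22:00 go trade"],
--     ["01:22:30","01:23:00 prepare trade","01:23:30 go trade"],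
--     ["01:24:00","01:24:30 prepare trade","01:25:00 go trade"],
--     ["01:25:30","01:26:00 prepare trade","01:26:30 go trade"],
--     ["01:27:00","01:27:30 prepare trade","01:28:00 go trade"],
--     ["01:28:30","01:29:00 prepare trade","01:29:30 go trade"],
--     ["01:30:00","01:30:30 prepare trade","01:31:00 go trade"],
--     ["01:31:30","01:32:00 prepare trade","01:32:30 go trade"],
--     ["01:33:00","01:33:30 prepare trade","01:34:00 go trade"],
--     ["01:34:30","01:35:00 prepare trade","01:35:30 go trade"],
--     ["01:36:00","01:36:30 prepare trade","01:37:00 go trade"],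
--     ["01:37:30","01:38:00 prepare trade","01:38:30 go trade"],
--     ["01:39:00","01:39:30 prepare trade","01:40:00 go trade"],
--     ["01:40:30","01:41:00 prepare trade","01:41:30 go trade"],
--     ["01:42:00","01:42:30 prepare trade","01:43:00 go trade"],
--     ["01:43:30","01:44:00 prepare trade","01:44:30 go trade"],
--     ["01:45:00","01:45:30 prepare trade","01:46:00 go trade"],
--     ["01:46:30","01:47:00 prepare trade","01:47:30 go trade"],
--     ["01:48:00","01:48:30 prepare trade","01:49:00 go trade"],
--     ["01:49:30","01:50:00 prepare trade","01:50:30 go trade"],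
--     ["01:51:00","01:51:30 prepare trade","01:52:00 go trade"],
--     ["01:52:30","01:53:00 prepare trade","01:53:30 go trade"],
--     ["01:54:00","01:54:30 prepare trade","01:55:00 go trade"],
--     ["01:55:30","01:56:00 prepare trade","01:56:30 go trade"],
--     ["01:57:00","01:57:30 prepare trade","01:58:00 go trade"],
--     ["01:58:30","01:59:00 prepare trade","01:59:30 go trade"]
-- ]
--
-- def find_group_by_minute(minute):
--     for i, g in enumerate(trade_table):
--         for v in g:
--             try:
--                 if int(v.split(":")[1]) == minute:
--                     return i
--             except:
--                 pass
--     return None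
-- ===== SOURCE B (Python) =====
-- # B: O(1) arithmetic instead of scanning the table. The table is a fixed
-- # 90-second schedule: group i holds entries at seconds 90*i, 90*i+30, 90*i+60,
-- # so the first group whose minute field equals m (0 <= m <= 59) is
-- # 2*(m//3) + (1 if m % 3 == 2 else 0); outside 0..59 no entry matches.
-- def find_group_by_minute(minute):
--     if 0 <= minute <= 59:
--         q, r = divmod(minute, 3)
--         return 2 * q + (1 if r == 2 else 0)
--     return None
-- ===== Notes on version B (the rewrite author's own statement) =====
-- stated objective: faster
-- what changed: Replaced the nested scan over the 40x3 string table (split+int-parse per cell) with a closed-form arithmetic formula derived from the table's fixed 90-second schedule.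
import Mathlib
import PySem

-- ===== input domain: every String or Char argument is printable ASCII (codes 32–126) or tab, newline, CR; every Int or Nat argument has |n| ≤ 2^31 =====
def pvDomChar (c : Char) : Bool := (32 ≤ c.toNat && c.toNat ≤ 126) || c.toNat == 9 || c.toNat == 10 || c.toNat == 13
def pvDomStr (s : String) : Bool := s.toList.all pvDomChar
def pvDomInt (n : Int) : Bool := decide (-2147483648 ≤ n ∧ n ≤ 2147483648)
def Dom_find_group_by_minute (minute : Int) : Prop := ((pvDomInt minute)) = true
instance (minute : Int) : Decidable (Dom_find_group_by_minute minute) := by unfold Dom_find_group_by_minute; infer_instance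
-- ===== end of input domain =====

-- ===== PORT A =====
-- B changes only the algorithm; return values are proved equal on all of Dom (A is total).
def trade_table : List (List String) := [
  ["01:00:00", "01:00:30 prepare trade", "01:01:00 go trade"],
  ["01:01:30", "01:02:00 prepare trade", "01:02:30 go trade"],
  ["01:03:00", "01:03:30 prepare trade", "01:04:00 go trade"],
  ["01:04:30", "01:05:00 prepare trade", "01:05:30 go trade"],
  ["01:06:00", "01:06:30 prepare trade", "01:07:00 go trade"],
  ["01:07:30", "01:08:00 prepare trade", "01:08:30 go trade"],
  ["01:09:00", "01:09:30 prepare trade", "01:10:00 go trade"],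
  ["01:10:30", "01:11:00 prepare trade", "01:11:30 go trade"],
  ["01:12:00", "01:12:30 prepare trade", "01:13:00 go trade"],
  ["01:13:30", "01:14:00 prepare trade", "01:14:30 go trade"],
  ["01:15:00", "01:15:30 prepare trade", "01:16:00 go trade"],
  ["01:16:30", "01:17:00 prepare trade", "01:17:30 go trade"],
  ["01:18:00", "01:18:30 prepare trade", "01:19:00 go trade"],
  ["01:19:30", "01:20:00 prepare trade", "01:20:30 go trade"],
  ["01:21:00", "01:21:30 prepare trade", "01:22:00 go trade"],
  ["01:22:30", "01:23:00 prepare trade", "01:23:30 go trade"],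
  ["01:24:00", "01:24:30 prepare trade", "01:25:00 go trade"],
  ["01:25:30", "01:26:00 prepare trade", "01:26:30 go trade"],
  ["01:27:00", "01:27:30 prepare trade", "01:28:00 go trade"],
  ["01:28:30", "01:29:00 prepare trade", "01:29:30 go trade"],
  ["01:30:00", "01:30:30 prepare trade", "01:31:00 go trade"],
  ["01:31:30", "01:32:00 prepare trade", "01:32:30 go trade"],
  ["01:33:00", "01:33:30 prepare trade", "01:34:00 go trade"],
  ["01:34:30", "01:35:00 prepare trade", "01:35:30 go trade"],
  ["01:36:00", "01:36:30 prepare trade", "01:37:00 go trade"],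
  ["01:37:30", "01:38:00 prepare trade", "01:38:30 go trade"],
  ["01:39:00", "01:39:30 prepare trade", "01:40:00 go trade"],
  ["01:40:30", "01:41:00 prepare trade", "01:41:30 go trade"],
  ["01:42:00", "01:42:30 prepare trade", "01:43:00 go trade"],
  ["01:43:30", "01:44:00 prepare trade", "01:44:30 go trade"],
  ["01:45:00", "01:45:30 prepare trade", "01:46:00 go trade"],
  ["01:46:30", "01:47:00 prepare trade", "01:47:30 go trade"],
  ["01:48:00", "01:48:30 prepare trade", "01:49:00 go trade"],
  ["01:49:30", "01:50:00 prepare trade", "01:50:30 go trade"],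
  ["01:51:00", "01:51:30 prepare trade", "01:52:00 go trade"],
  ["01:52:30", "01:53:00 prepare trade", "01:53:30 go trade"],
  ["01:54:00", "01:54:30 prepare trade", "01:55:00 go trade"],
  ["01:55:30", "01:56:00 prepare trade", "01:56:30 go trade"],
  ["01:57:00", "01:57:30 prepare trade", "01:58:00 go trade"],
  ["01:58:30", "01:59:00 prepare trade", "01:59:30 go trade"]]

-- the try-block: v.split(":")[1] then int(...) ; none = the caught exception (IndexError/ValueError)
def tryKey? (v : String) : Option Int :=
  match PySem.Str.split? v ":" with
  | none => none
  | some parts =>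
    match PySem.List.pyGet? parts 1 with
    | none => none
    | some s => PySem.Int.ofStr? s

-- inner 'for v in g: ... return i' : does some cell of g match minute?
def scanGroup (g : List String) (minute : Int) : Bool :=
  g.any (fun v => match tryKey? v with
    | some k => k == minute
    | none => false)

-- outer 'for i, g in enumerate(trade_table)' with early return
def scanTable : List (List String) → Int → Int → Option Int
  | [], _, _ => none
  | g :: rest, i, minute =>
      if scanGroup g minute then some i else scanTable rest (i + 1) minute

def find_group_by_minute (minute : Int) : Option Int :=
  scanTable trade_table 0 minute

-- ===== PORT B =====
def find_group_by_minute_alt (minute : Int) : Option Int :=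
  if 0 ≤ minute ∧ minute ≤ 59 then
    some (2 * PySem.Int.floordiv minute 3 +
      (if PySem.Int.mod minute 3 == 2 then 1 else 0))
  else none

-- ===== PRECONDITION & SPEC =====
def Spec_find_group_by_minute (minute : Int) (out : Option Int) : Prop := out = find_group_by_minute_alt minute
instance (minute : Int) (out : Option Int) : Decidable (Spec_find_group_by_minute minute out) := by unfold Spec_find_group_by_minute; infer_instance

-- ===== CLAIM (what is proved, stated in full; the proofs are below) =====
def Claim_equal_find_group_by_minute : Prop := ∀ (minute : Int), Dom_find_group_by_minute minute → Spec_find_group_by_minute minute (find_group_by_minute minute)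

-- ===== LEMMAS AND PROOFS =====

-- every minute value parsed from the table lies in [0, 59]
lemma table_keys_bounded :
    ∀ g ∈ trade_table, ∀ v ∈ g,
      (tryKey? v).all (fun k => decide (0 ≤ k) && decide (k ≤ 59)) = true := by
  decide

lemma scanTable_none (t : List (List String)) (i m : Int)
    (hm : m < 0 ∨ 59 < m)
    (ht : ∀ g ∈ t, ∀ v ∈ g,
      (tryKey? v).all (fun k => decide (0 ≤ k) && decide (k ≤ 59)) = true) :
    scanTable t i m = none := by
  induction t generalizing i with
  | nil => rfl
  | cons g rest ih =>
    have hg : scanGroup g m = false := by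
      simp only [scanGroup, List.any_eq_false]
      intro v hv
      have hb := ht g (by simp) v hv
      cases hk : tryKey? v with
      | none => simp
      | some k =>
        rw [hk] at hb
        simp only [Option.all_some, Bool.and_eq_true, decide_eq_true_eq] at hb
        simp only [beq_iff_eq]
        rcases hm with hm | hm <;> omega
    simp only [scanTable, hg, Bool.false_eq_true, if_false]
    exact ih (i + 1) (fun g hg => ht g (by simp [hg]))

lemma agree_in_range :
    ∀ n : Nat, n < 60 →
      find_group_by_minute (n : Int) = find_group_by_minute_alt (n : Int) := by
  decide

-- ===== VERDICT (by name: the statement is the Claim_ definition above) =====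
theorem find_group_by_minute_spec : Claim_equal_find_group_by_minute := by
  intro m _
  unfold Spec_find_group_by_minute
  by_cases h : 0 ≤ m ∧ m ≤ 59
  · obtain ⟨h0, h1⟩ := h
    have hn : m = ((m.toNat : Nat) : Int) := (Int.toNat_of_nonneg h0).symm
    rw [hn]
    exact agree_in_range m.toNat (by omega)
  · have hm : m < 0 ∨ 59 < m := by omega
    rw [find_group_by_minute, scanTable_none _ _ _ hm table_keys_bounded,
      find_group_by_minute_alt, if_neg h]
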